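-- pv_equiv track=rewrite | github.com/shafe123/AoC22 | day10.py | draw_crt
-- ===== SOURCE A (Python) =====
-- def draw_crt(operations):
--     register = 1
--
--     crt = []
--     for row in range(6):
--         current_crt = []
--         for count, op in enumerate(operations[row * 40:(row+1)*40]):
--             sprite = [register - 1, register, register + 1]
--             if count in sprite:
--                 current_crt.append("#")
--             else:
--                 current_crt.append(".")
--
--             if op is None:
--                 pass
--             else:
--                 register += op
--         crt.append(current_crt)
--     return crt
-- ===== SOURCE B (Python) =====
-- def draw_crt(operations):
--     # Pass 1: register value as-of each of the first 240 cycles.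
--     regs = []
--     register = 1
--     for op in operations[:240]:
--         regs.append(register)
--         if op is not None:
--             register += op
--     # Pass 2: render each of the 6 rows from the trace.
--     return [["#" if abs(col - val) <= 1 else "."
--              for col, val in enumerate(regs[row * 40:(row + 1) * 40])]
--             for row in range(6)]
-- ===== Notes on version B (the rewrite author's own statement) =====
-- stated objective: alternative
-- what changed: Replaces the interleaved per-row simulate-and-draw loop by two passes: one fold building the register trace for the first 240 cycles, then a pure rendering comprehension lighting pixel (row,col) iff |col - trace[row*40+col]| <= 1.
import Mathlib
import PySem

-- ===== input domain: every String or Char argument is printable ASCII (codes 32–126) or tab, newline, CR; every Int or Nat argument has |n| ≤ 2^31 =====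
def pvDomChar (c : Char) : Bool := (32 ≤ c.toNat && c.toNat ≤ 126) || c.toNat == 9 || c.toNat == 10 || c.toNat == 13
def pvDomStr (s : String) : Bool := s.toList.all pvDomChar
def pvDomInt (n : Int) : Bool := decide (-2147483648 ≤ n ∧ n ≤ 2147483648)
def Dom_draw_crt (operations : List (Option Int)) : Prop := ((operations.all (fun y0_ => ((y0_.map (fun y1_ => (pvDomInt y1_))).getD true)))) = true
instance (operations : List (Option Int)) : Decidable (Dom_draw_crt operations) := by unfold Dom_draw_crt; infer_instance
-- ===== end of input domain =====

-- B replaces A's interleaved simulate-and-draw row loop by two passes (register trace, then pure rendering); alternative decomposition, same cost.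


-- ===== PORT A =====
def draw_crt (operations : List (Option Int)) : List (List String) :=
  let res := (PySem.List.pyRange 0 6 1).foldl (fun (st : Int × List (List String)) row =>
    let inner := (PySem.List.enumerate
        (PySem.List.slice operations (some (row * 40)) (some ((row + 1) * 40))) 0).foldl
      (fun (s : Int × List String) ce =>
        let sprite := [s.1 - 1, s.1, s.1 + 1]
        let cur := if ce.1 ∈ sprite then s.2 ++ ["#"] else s.2 ++ ["."]
        let reg := match ce.2 with | none => s.1 | some v => s.1 + v
        (reg, cur)) (st.1, ([] : List String))
    (inner.1, st.2 ++ [inner.2])) (1, ([] : List (List String)))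
  res.2

-- ===== PORT B =====
def draw_crt_alt (operations : List (Option Int)) : List (List String) :=
  let fin := (PySem.List.slice operations none (some 240)).foldl
    (fun (s : List Int × Int) op =>
      (s.1 ++ [s.2], match op with | none => s.2 | some v => s.2 + v)) (([] : List Int), 1)
  (PySem.List.pyRange 0 6 1).map (fun row =>
    (PySem.List.enumerate (PySem.List.slice fin.1 (some (row * 40)) (some ((row + 1) * 40))) 0).map
      (fun cv => if |cv.1 - cv.2| ≤ 1 then "#" else "."))

-- ===== PRECONDITION & SPEC =====
def Spec_draw_crt (operations : List (Option Int)) (out : List (List String)) : Prop := out = draw_crt_alt operations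
instance (operations : List (Option Int)) (out : List (List String)) : Decidable (Spec_draw_crt operations out) := by unfold Spec_draw_crt; infer_instance

-- ===== CLAIM (what is proved, stated in full; the proofs are below) =====
def Claim_equal_draw_crt : Prop := ∀ (operations : List (Option Int)), Dom_draw_crt operations → Spec_draw_crt operations (draw_crt operations)


-- ===== LEMMAS AND PROOFS =====

-- register step / final register / per-cycle register trace of a run of operations
def pvStep (r : Int) (op : Option Int) : Int := match op with | none => r | some v => r + v

def pvAfter (r : Int) (ops : List (Option Int)) : Int := ops.foldl pvStep r

def pvTrace (r : Int) : List (Option Int) → List Int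
  | [] => []
  | op :: t => r :: pvTrace (pvStep r op) t

def pvPix (cv : Int × Int) : String := if |cv.1 - cv.2| ≤ 1 then "#" else "."

def pvRow (k : Int) (vs : List Int) : List String := (PySem.List.enumerate vs k).map pvPix

-- A's inner loop = final register + pixels rendered from the trace
lemma pv_rowB (vs : List Int) :
    List.map (fun cv : Int × Int => if |cv.1 - cv.2| ≤ 1 then "#" else ".")
      (PySem.List.enumerate vs 0) = pvRow 0 vs := rfl

lemma pv_innerA (ops : List (Option Int)) : ∀ (k ρ : Int) (acc : List String),
    (PySem.List.enumerate ops k).foldl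
      (fun (s : Int × List String) ce =>
        ((match ce.2 with | none => s.1 | some v => s.1 + v),
         if ce.1 ∈ [s.1 - 1, s.1, s.1 + 1] then s.2 ++ ["#"] else s.2 ++ ["."])) (ρ, acc)
    = (pvAfter ρ ops, acc ++ pvRow k (pvTrace ρ ops)) := by
  induction ops with
  | nil => intro k ρ acc; simp [PySem.List.enumerate_nil, pvAfter, pvTrace, pvRow]
  | cons op t ih =>
    intro k ρ acc
    rw [PySem.List.enumerate_cons]
    simp only [List.foldl_cons]
    rw [ih]
    have hc : (k ∈ [ρ - 1, ρ, ρ + 1]) ↔ |k - ρ| ≤ 1 := by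
      simp only [List.mem_cons, List.not_mem_nil, or_false, abs_le]
      omega
    have hpix : (if k ∈ [ρ - 1, ρ, ρ + 1] then acc ++ ["#"] else acc ++ ["."])
        = acc ++ [pvPix (k, ρ)] := by
      simp only [pvPix]
      by_cases h : |k - ρ| ≤ 1
      · rw [if_pos (hc.mpr h), if_pos h]
      · rw [if_neg (fun hm => h (hc.mp hm)), if_neg h]
    simp only [hpix, pvAfter, List.foldl_cons, pvTrace, pvRow, pvStep,
      PySem.List.enumerate_cons, List.map_cons, List.append_assoc, List.cons_append,
      List.nil_append]

-- B's first pass accumulates exactly the trace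
lemma pv_traceB (ops : List (Option Int)) : ∀ (acc : List Int) (ρ : Int),
    (ops.foldl (fun (s : List Int × Int) op =>
      (s.1 ++ [s.2], match op with | none => s.2 | some v => s.2 + v)) (acc, ρ)).1
    = acc ++ pvTrace ρ ops := by
  induction ops with
  | nil => intro acc ρ; simp [pvTrace]
  | cons op t ih =>
    intro acc ρ
    simp only [List.foldl_cons]
    rw [ih]
    simp [pvTrace, pvStep]

lemma pvTrace_take : ∀ (n : Nat) (ops : List (Option Int)) (ρ : Int),
    (pvTrace ρ ops).take n = pvTrace ρ (ops.take n) := by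
  intro n
  induction n with
  | zero => intro ops ρ; simp [pvTrace]
  | succ m ih =>
    intro ops ρ
    cases ops with
    | nil => simp [pvTrace]
    | cons op t => simp [pvTrace, ih]

lemma pvTrace_drop : ∀ (n : Nat) (ops : List (Option Int)) (ρ : Int),
    (pvTrace ρ ops).drop n = pvTrace (pvAfter ρ (ops.take n)) (ops.drop n) := by
  intro n
  induction n with
  | zero => intro ops ρ; simp [pvAfter]
  | succ m ih =>
    intro ops ρ
    cases ops with
    | nil => simp [pvTrace, pvAfter]
    | cons op t => simp [pvTrace, pvAfter, ih, List.foldl_cons]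

-- a 40-wide window of the 240-cycle trace is the trace of the matching operation window
lemma pv_chunk (ops : List (Option Int)) (a : Nat) (ha : a + 40 ≤ 240) :
    ((pvTrace 1 (ops.take 240)).drop a).take 40
      = pvTrace (pvAfter 1 (ops.take a)) ((ops.drop a).take 40) := by
  have h1 : min a 240 = a := by omega
  have h2 : min 40 (240 - a) = 40 := by omega
  rw [pvTrace_drop, pvTrace_take, List.drop_take, List.take_take, List.take_take, h1, h2]

lemma pv_after_chunk (ops : List (Option Int)) (a : Nat) :
    pvAfter (pvAfter 1 (ops.take a)) ((ops.drop a).take 40) = pvAfter 1 (ops.take (a + 40)) := by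
  simp only [pvAfter]
  rw [← List.foldl_append, ← List.take_add]

-- ===== VERDICT (by name: the statement is the Claim_ definition above) =====
theorem draw_crt_spec : Claim_equal_draw_crt := by
  intro ops _
  unfold Spec_draw_crt draw_crt draw_crt_alt
  have hrange : PySem.List.pyRange 0 6 1 = [0, 1, 2, 3, 4, 5] := by decide
  rw [hrange, PySem.List.slice_to _ (by norm_num)]
  simp only [List.foldl_cons, List.foldl_nil, List.map_cons, List.map_nil, pv_innerA, pv_traceB, List.nil_append, pv_rowB]
  norm_num
  simp only [show (40:Int) = ((40:Nat):Int) from rfl, show (80:Int) = ((80:Nat):Int) from rfl,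
    show (120:Int) = ((120:Nat):Int) from rfl, show (160:Int) = ((160:Nat):Int) from rfl,
    show (200:Int) = ((200:Nat):Int) from rfl, show (240:Int) = ((240:Nat):Int) from rfl,
    PySem.List.slice_natCast, PySem.List.slice_to_natCast, Int.toNat_natCast]
  norm_num
  rw [pv_chunk ops 40 (by norm_num), pv_chunk ops 80 (by norm_num), pv_chunk ops 120 (by norm_num),
    pv_chunk ops 160 (by norm_num), pv_chunk ops 200 (by norm_num)]
  rw [pvTrace_take, List.take_take]
  norm_num
  simp only [pv_after_chunk ops 40]; norm_num
  simp only [pv_after_chunk ops 80]; norm_num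
  simp only [pv_after_chunk ops 120]; norm_num
  simp only [pv_after_chunk ops 160]
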